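-- pv_equiv track=rewrite | github.com/ekkus93/vscode_skills | skills/excel-to-markdown/excel_to_markdown.py | trim_rows
-- ===== SOURCE A (Python) =====
-- def trim_rows(rows: list[list[str]]) -> list[list[str]]:
--     trimmed_rows = [list(row) for row in rows]
--     while trimmed_rows and not any(cell.strip() for cell in trimmed_rows[-1]):
--         trimmed_rows.pop()
--     if not trimmed_rows:
--         return []
--     max_columns = 0
--     for row in trimmed_rows:
--         for index in range(len(row) - 1, -1, -1):
--             if row[index].strip():
--                 max_columns = max(max_columns, index + 1)
--                 break
--     if max_columns == 0:
--         return []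
--     return [row[:max_columns] + [""] * max(0, max_columns - len(row)) for row in trimmed_rows]
-- ===== SOURCE B (Python) =====
-- def trim_rows(rows: list[list[str]]) -> list[list[str]]:
--     trimmed = [list(row) for row in rows]
--     while trimmed and not any(cell.strip() for cell in trimmed[-1]):
--         trimmed.pop()
--     if not trimmed:
--         return []
--     height = max(len(row) for row in trimmed)
--     columns = [[row[i] if i < len(row) else "" for row in trimmed]
--                for i in range(height)]
--     while columns and not any(cell.strip() for cell in columns[-1]):
--         columns.pop()
--     return [[column[j] for column in columns] for j in range(len(trimmed))]
-- ===== Notes on version B (the rewrite author's own statement) =====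
-- stated objective: alternative
-- what changed: B replaces A's per-row reversed index scan with break (accumulating max_columns) and the slice-plus-pad rebuild by a column-wise transposition: it transposes the row-trimmed grid with an empty-string fill, pops trailing all-blank columns exactly like the row loop, and transposes back, so width, truncation and padding all fall out of the transposition.
import Mathlib
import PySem

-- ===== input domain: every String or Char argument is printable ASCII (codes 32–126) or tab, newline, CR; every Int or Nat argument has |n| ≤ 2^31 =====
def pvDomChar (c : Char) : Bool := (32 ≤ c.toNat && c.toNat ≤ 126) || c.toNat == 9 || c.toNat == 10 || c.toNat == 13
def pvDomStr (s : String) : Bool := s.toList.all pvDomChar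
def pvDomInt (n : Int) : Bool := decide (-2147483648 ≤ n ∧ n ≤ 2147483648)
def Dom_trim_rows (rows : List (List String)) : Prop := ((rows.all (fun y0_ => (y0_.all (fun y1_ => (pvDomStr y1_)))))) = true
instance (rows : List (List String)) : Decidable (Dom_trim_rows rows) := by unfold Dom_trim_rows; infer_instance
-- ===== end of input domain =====

-- B replaces A's per-row reversed index scan (accumulating max_columns) and slice+pad rebuild
-- by transposing the row-trimmed grid with "" fill, dropping trailing all-blank columns, and
-- transposing back (objective: alternative decomposition, same cost).


-- Python truthiness of cell.strip(): a cell is blank iff its strip is empty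
def pvCellBlank (c : String) : Bool := PySem.Str.strip c == ""

-- `not any(cell.strip() for cell in row)` — shared by both Pythons, word for word
def pvRowBlank (r : List String) : Bool := r.all pvCellBlank

-- the `while xs and not any(...): xs.pop()` loop both Pythons run (pop trailing blank rows)
def pvDropTrail {α : Type} (p : α → Bool) : List α → List α
  | [] => []
  | x :: xs =>
    match pvDropTrail p xs with
    | [] => if p x then [] else [x]
    | y :: ys => x :: y :: ys

-- ===== PORT A =====
-- A's inner `for index in range(len(row)-1, -1, -1): if row[index].strip(): … break`:
-- walk the reversed row carrying index+1
def pvLastWidth : List String → Nat → Nat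
  | [], _ => 0
  | c :: rest, n => if pvCellBlank c then pvLastWidth rest (n - 1) else n

-- `[list(row) for row in rows]` copies; on immutable Lean lists the copy is the identity
def trim_rows (rows : List (List String)) : List (List String) :=
  let trimmed := pvDropTrail pvRowBlank rows
  if trimmed = [] then []
  else
    let maxColumns := trimmed.foldl (fun m row => max m (pvLastWidth row.reverse row.length)) 0
    if maxColumns = 0 then []
    else trimmed.map (fun row => row.take maxColumns ++ List.replicate (maxColumns - row.length) "")

-- ===== PORT B =====
def trim_rows_alt (rows : List (List String)) : List (List String) :=
  let trimmed := pvDropTrail pvRowBlank rows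
  if trimmed = [] then []
  else
    let height := trimmed.foldl (fun m row => max m row.length) 0
    let columns := (List.range height).map (fun i => trimmed.map (fun row => row.getD i ""))
    let kept := pvDropTrail pvRowBlank columns
    (List.range trimmed.length).map (fun j => kept.map (fun col => col.getD j ""))

-- ===== PRECONDITION & SPEC =====
def Spec_trim_rows (rows : List (List String)) (out : List (List String)) : Prop := out = trim_rows_alt rows
instance (rows : List (List String)) (out : List (List String)) : Decidable (Spec_trim_rows rows out) := by unfold Spec_trim_rows; infer_instance

-- ===== CLAIM (what is proved, stated in full; the proofs are below) =====
def Claim_equal_trim_rows : Prop := ∀ (rows : List (List String)), Dom_trim_rows rows → Spec_trim_rows rows (trim_rows rows)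

-- ===== LEMMAS AND PROOFS =====

theorem pvDropTrail_prefix {α : Type} (p : α → Bool) (l : List α) : pvDropTrail p l <+: l := by
  induction l with
  | nil => simp [pvDropTrail]
  | cons x xs ih =>
    cases h : pvDropTrail p xs with
    | nil => simp only [pvDropTrail, h]; split <;> simp
    | cons y ys =>
      simp only [pvDropTrail, h]
      exact (List.prefix_cons_inj x).mpr (h ▸ ih)

theorem pvDropTrail_len_le {α : Type} (p : α → Bool) (l : List α) :
    (pvDropTrail p l).length ≤ l.length :=
  (pvDropTrail_prefix p l).length_le

-- everything at or beyond the kept length is blank (default included)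
theorem pvDropTrail_blank_ge {α : Type} (p : α → Bool) (d : α) (hd : p d = true) (l : List α) :
    ∀ j, (pvDropTrail p l).length ≤ j → p (l.getD j d) = true := by
  induction l with
  | nil => intro j _; simpa [List.getD]
  | cons x xs ih =>
    intro j hj
    cases h : pvDropTrail p xs with
    | nil =>
      rw [h] at ih
      simp only [pvDropTrail, h] at hj
      by_cases hx : p x = true
      · simp [hx] at hj
        cases j with
        | zero => simpa [List.getD] using hx
        | succ k => simpa [List.getD] using ih k (by simp)
      · simp [hx] at hj
        cases j with
        | zero => omega
        | succ k => simpa [List.getD] using ih k (by simp)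
    | cons y ys =>
      simp only [pvDropTrail, h, List.length_cons] at hj
      rw [h] at ih
      cases j with
      | zero => omega
      | succ k => simpa [List.getD] using ih k (by simp at hj ⊢; omega)

-- the cell just before the kept length is not blank
theorem pvDropTrail_last_not {α : Type} (p : α → Bool) (d : α) (l : List α)
    (h : pvDropTrail p l ≠ []) :
    p (l.getD ((pvDropTrail p l).length - 1) d) = false := by
  induction l with
  | nil => simp [pvDropTrail] at h
  | cons x xs ih =>
    cases h2 : pvDropTrail p xs with
    | nil =>
      simp only [pvDropTrail, h2] at h ⊢
      by_cases hx : p x = true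
      · simp [hx] at h
      · simp [hx, List.getD]
    | cons y ys =>
      have ihh := ih (by simp [h2])
      rw [h2] at ihh
      simp only [pvDropTrail, h2, List.length_cons, Nat.add_sub_cancel] at ihh ⊢
      simpa [List.getD_cons_succ] using ihh

-- two "widths" with the same blank-suffix characterisation are equal
theorem width_unique {P : Nat → Bool} {n m : Nat}
    (h1 : ∀ j, n ≤ j → P j = true) (h2 : n = 0 ∨ P (n - 1) = false)
    (h3 : ∀ j, m ≤ j → P j = true) (h4 : m = 0 ∨ P (m - 1) = false) : n = m := by
  by_contra hne
  rcases Nat.lt_or_ge n m with hlt | hge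
  · rcases h4 with rfl | h4
    · omega
    · have := h1 (m - 1) (by omega); rw [this] at h4; exact absurd h4 (by simp)
  · have hlt : m < n := by omega
    rcases h2 with rfl | h2
    · omega
    · have := h3 (n - 1) (by omega); rw [this] at h2; exact absurd h2 (by simp)

theorem pvLastWidth_go (s : List String) :
    pvLastWidth s s.length = (s.dropWhile pvCellBlank).length := by
  induction s with
  | nil => simp [pvLastWidth]
  | cons c rest ih =>
    by_cases hc : pvCellBlank c = true
    · simpa [pvLastWidth, List.dropWhile, hc] using ih
    · simp [pvLastWidth, List.dropWhile, hc]

theorem pvDropTrail_append_singleton {α : Type} (p : α → Bool) (x : α) (ys : List α) :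
    pvDropTrail p (ys ++ [x]) = if p x = true then pvDropTrail p ys else ys ++ [x] := by
  induction ys with
  | nil => simp [pvDropTrail]
  | cons y ys ih =>
    by_cases hx : p x = true
    · simp only [List.cons_append, pvDropTrail, ih, if_pos hx]
    · simp only [List.cons_append, pvDropTrail, ih, if_neg hx]
      cases ys <;> simp

theorem pvDropTrail_length_rev {α : Type} (p : α → Bool) (l : List α) :
    (pvDropTrail p l).length = (l.reverse.dropWhile p).length := by
  induction l using List.reverseRecOn with
  | nil => simp [pvDropTrail]
  | append_singleton ys x ih =>
    rw [pvDropTrail_append_singleton]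
    by_cases hx : p x = true
    · simpa [hx, List.dropWhile] using ih
    · simp [hx]

-- A's inner scan computes the length of the row with trailing blank cells dropped
theorem widthA_eq (r : List String) :
    pvLastWidth r.reverse r.length = (pvDropTrail pvCellBlank r).length := by
  have h := pvLastWidth_go r.reverse
  rw [List.length_reverse] at h
  rw [h, pvDropTrail_length_rev]

theorem le_foldl_maxf {α : Type} (f : α → Nat) (l : List α) (a : Nat) :
    (∀ x ∈ l, f x ≤ l.foldl (fun m r => max m (f r)) a) ∧
      a ≤ l.foldl (fun m r => max m (f r)) a := by
  induction l generalizing a with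
  | nil => simp
  | cons y ys ih =>
    refine ⟨?_, ?_⟩
    · intro x hx
      simp only [List.foldl_cons]
      rcases List.mem_cons.mp hx with rfl | hmem
      · exact le_trans (le_max_right a (f x)) (ih _).2
      · exact (ih _).1 x hmem
    · simp only [List.foldl_cons]
      exact le_trans (le_max_left _ _) (ih _).2

theorem foldl_maxf_attained {α : Type} (f : α → Nat) (l : List α) (a : Nat) :
    l.foldl (fun m r => max m (f r)) a = a ∨
      ∃ x ∈ l, l.foldl (fun m r => max m (f r)) a = f x := by
  induction l generalizing a with
  | nil => exact Or.inl rfl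
  | cons y ys ih =>
    simp only [List.foldl_cons]
    rcases ih (max a (f y)) with h | ⟨x, hx, hfx⟩
    · by_cases hle : a ≤ f y
      · exact Or.inr ⟨y, by simp, by rw [h]; omega⟩
      · exact Or.inl (by rw [h]; omega)
    · exact Or.inr ⟨x, by simp [hx], hfx⟩

theorem pvCellBlank_empty : pvCellBlank "" = true := by decide

theorem rowBlank_iff (r : List String) :
    pvRowBlank r = true ↔ ∀ j : Nat, pvCellBlank (r.getD j "") = true := by
  constructor
  · intro h j
    by_cases hj : j < r.length
    · rw [List.getD_eq_getElem r "" hj]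
      exact (List.all_eq_true.mp h) _ (List.getElem_mem hj)
    · rw [List.getD_eq_default _ _ (by omega)]
      exact pvCellBlank_empty
  · intro h
    apply List.all_eq_true.mpr
    intro c hc
    obtain ⟨j, hj, rfl⟩ := List.mem_iff_getElem.mp hc
    have := h j
    rwa [List.getD_eq_getElem r "" hj] at this

-- blankness of the j-th column of the transposed grid, as a statement about the rows
theorem colBlank_iff (T : List (List String)) (H : Nat) (hH : ∀ r ∈ T, r.length ≤ H) (j : Nat) :
    pvRowBlank (((List.range H).map (fun i => T.map (fun row => row.getD i ""))).getD j []) = true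
      ↔ ∀ r ∈ T, pvCellBlank (r.getD j "") = true := by
  by_cases hj : j < H
  · rw [List.getD_eq_getElem _ [] (by simpa using hj)]
    simp only [List.getElem_map, List.getElem_range]
    constructor
    · intro h r hr
      exact (List.all_eq_true.mp h) _ (List.mem_map.mpr ⟨r, hr, rfl⟩)
    · intro h
      apply List.all_eq_true.mpr
      intro c hc
      obtain ⟨r, hr, rfl⟩ := List.mem_map.mp hc
      exact h r hr
  · rw [List.getD_eq_default _ _ (by simpa using hj)]
    simp only [pvRowBlank, List.all_nil, true_iff]
    intro r hr
    rw [List.getD_eq_default _ _ (by have := hH r hr; omega)]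
    exact pvCellBlank_empty

-- row[:W] + [""]*(W - len(row)) is the W-wide read-off with default ""
theorem pad_eq (row : List String) (W : Nat) :
    row.take W ++ List.replicate (W - row.length) "" =
      (List.range W).map (fun i => row.getD i "") := by
  apply List.ext_getElem
  · simp; omega
  · intro i h1 h2
    have hiW : i < W := by simpa using h2
    simp only [List.getElem_map, List.getElem_range]
    by_cases hil : i < row.length
    · rw [List.getElem_append_left (by simp; omega)]
      rw [List.getElem_take]
      rw [List.getD_eq_getElem _ _ hil]
    · rw [List.getElem_append_right (by simp; omega)]
      rw [List.getElem_replicate]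
      rw [List.getD_eq_default _ _ (by omega)]

-- ===== VERDICT (by name: the statement is the Claim_ definition above) =====
theorem trim_rows_spec : Claim_equal_trim_rows := by
  intro rows _
  unfold Spec_trim_rows trim_rows trim_rows_alt
  by_cases hTe : pvDropTrail pvRowBlank rows = []
  · simp [hTe]
  · simp only [if_neg hTe]
    set T := pvDropTrail pvRowBlank rows with hT
    set W := T.foldl (fun m row => max m (pvLastWidth row.reverse row.length)) 0 with hW
    set H := T.foldl (fun m row => max m row.length) 0 with hH
    set cols := (List.range H).map (fun i => T.map (fun row => row.getD i "")) with hcols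
    -- the last kept row is not blank, hence W ≠ 0
    have hTlen : 0 < T.length := List.length_pos_iff.mpr hTe
    have hTlenle : T.length ≤ rows.length := pvDropTrail_len_le _ _
    have hlast : pvRowBlank (rows.getD (T.length - 1) []) = false :=
      pvDropTrail_last_not pvRowBlank [] rows hTe
    have hidx : T.length - 1 < T.length := by omega
    have hr0eq : T[T.length - 1]'hidx = rows[T.length - 1]'(by omega) :=
      List.IsPrefix.getElem (pvDropTrail_prefix pvRowBlank rows) hidx
    have hr0mem : T[T.length - 1]'hidx ∈ T := List.getElem_mem hidx
    have hr0 : pvRowBlank (T[T.length - 1]'hidx) = false := by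
      rw [hr0eq, ← List.getD_eq_getElem rows [] (by omega)]
      exact hlast
    have hfr0 : pvLastWidth (T[T.length - 1]'hidx).reverse (T[T.length - 1]'hidx).length ≠ 0 := by
      intro h0
      rw [widthA_eq] at h0
      have hall : ∀ j : Nat, pvCellBlank ((T[T.length - 1]'hidx).getD j "") = true := by
        intro j
        exact pvDropTrail_blank_ge pvCellBlank "" pvCellBlank_empty _ j (by omega)
      rw [(rowBlank_iff _).mpr hall] at hr0
      simp at hr0
    have hW0 : W ≠ 0 := by
      intro h0
      have := (le_foldl_maxf (fun r => pvLastWidth r.reverse r.length) T 0).1 _ hr0mem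
      rw [← hW] at this
      omega
    rw [if_neg hW0]
    -- column heights
    have hHle : ∀ r ∈ T, r.length ≤ H := by
      intro r hr
      exact (le_foldl_maxf (fun r : List String => r.length) T 0).1 r hr
    -- characterisation of W as the trimmed-column count
    have hWle : ∀ r ∈ T, (pvDropTrail pvCellBlank r).length ≤ W := by
      intro r hr
      have := (le_foldl_maxf (fun r => pvLastWidth r.reverse r.length) T 0).1 r hr
      rwa [widthA_eq] at this
    have b1W : ∀ j, W ≤ j → pvRowBlank (cols.getD j []) = true := by
      intro j hj
      apply (colBlank_iff T H hHle j).mpr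
      intro r hr
      exact pvDropTrail_blank_ge pvCellBlank "" pvCellBlank_empty r j
        (le_trans (hWle r hr) hj)
    have b2W : pvRowBlank (cols.getD (W - 1) []) = false := by
      rcases foldl_maxf_attained (fun r => pvLastWidth r.reverse r.length) T 0 with h | ⟨r1, hr1, hfr1⟩
      · exact absurd (hW.trans h) hW0
      · have hlen1 : (pvDropTrail pvCellBlank r1).length = W := by
          rw [← widthA_eq, ← hfr1, hW]
        have hne : pvDropTrail pvCellBlank r1 ≠ [] := by
          intro hnil; rw [hnil] at hlen1; simp at hlen1; exact hW0 hlen1.symm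
        have hnot := pvDropTrail_last_not pvCellBlank "" r1 hne
        rw [hlen1] at hnot
        cases hP : pvRowBlank (cols.getD (W - 1) []) with
        | false => rfl
        | true =>
          have := (colBlank_iff T H hHle (W - 1)).mp hP r1 hr1
          rw [this] at hnot
          simp at hnot
    -- characterisation of the kept-column count
    set W' := (pvDropTrail pvRowBlank cols).length with hW'
    have b1W' : ∀ j, W' ≤ j → pvRowBlank (cols.getD j []) = true := by
      intro j hj
      exact pvDropTrail_blank_ge pvRowBlank [] rfl cols j hj
    have b2W' : W' = 0 ∨ pvRowBlank (cols.getD (W' - 1) []) = false := by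
      by_cases hk : pvDropTrail pvRowBlank cols = []
      · left; rw [hW', hk]; rfl
      · right; exact pvDropTrail_last_not pvRowBlank [] cols hk
    have hWW' : W = W' :=
      width_unique b1W (Or.inr b2W) b1W' b2W'
    -- the kept columns are the first W columns
    have hW'leH : W' ≤ H := by
      have := pvDropTrail_len_le pvRowBlank cols
      rw [← hW'] at this
      simpa [hcols] using this
    have hkept : pvDropTrail pvRowBlank cols =
        (List.range W).map (fun i => T.map (fun row => row.getD i "")) := by
      have hpre := List.prefix_iff_eq_take.mp (pvDropTrail_prefix pvRowBlank cols)
      rw [hpre, ← hW', hcols, ← List.map_take, List.take_range, min_eq_left hW'leH, hWW']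
    -- read both sides off elementwise
    rw [hkept]
    apply List.ext_getElem
    · simp
    · intro j h1 h2
      simp only [List.getElem_map, List.getElem_range, List.map_map]
      rw [pad_eq]
      apply List.map_congr_left
      intro i hi
      have hj : j < T.length := by simpa using h1
      simp only [Function.comp_apply]
      rw [List.getD_eq_getElem (T.map (fun row => row.getD i "")) "" (by simpa using hj)]
      simp
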